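-- pv_equiv track=rewrite | github.com/lkeude96/OSSU | Introduction to Computer Science/(MIT6.00.1x) Introduction to Computer Science and Programming Using Python/Week 4/nfruits/nfruits.py | nfruits
-- ===== SOURCE A (Python) =====
-- def nfruits(initial_quantities, fruit_eaten):
--     """
--
--     Determine the maximum quantity out of the different types of fruits that is present with Python
--     when he has reached the campus
--
--     :param initial_quantities: non-empty dictionary containing type of fruit and its quantity initially
--     :param fruit_eaten: string pattern of the fruits eaten
--     :return:  maximum of the quantities of the fruits
--     """
--     for current_fruit in range(len(fruit_eaten)):
--         for fruit in initial_quantities.keys():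
--             if fruit_eaten[current_fruit] == fruit:
--                 initial_quantities[fruit] -= 1
--             elif current_fruit != len(fruit_eaten) - 1:
--                 initial_quantities[fruit] += 1
--
--     max_quantity = 0;
--     for fruit in initial_quantities.keys():
--         if initial_quantities[fruit] > max_quantity:
--             max_quantity = initial_quantities[fruit]
--
--     return max_quantity
-- ===== SOURCE B (Python) =====
-- def nfruits(initial_quantities, fruit_eaten):
--     """One pass over fruit_eaten + one pass over the dict, via a closed form:
--     final(fruit) = q + n - 2*count(fruit) - (1 if n and last char != fruit else 0)."""
--     n = len(fruit_eaten)
--     counts = {}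
--     for ch in fruit_eaten:
--         counts[ch] = counts.get(ch, 0) + 1
--     last = fruit_eaten[-1] if n else None
--     best = 0
--     for fruit, q in initial_quantities.items():
--         final = q + n - 2 * counts.get(fruit, 0) - (1 if n and fruit != last else 0)
--         if final > best:
--             best = final
--     return best
-- ===== Notes on version B (the rewrite author's own statement) =====
-- stated objective: faster
-- what changed: B replaces A's simulation of every eaten fruit against every dict key by a single counting pass over fruit_eaten and a per-fruit closed form final = q + n - 2*count(fruit) - (1 if n and last char != fruit else 0), taking the running max in one pass over the dict.
import Mathlib
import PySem

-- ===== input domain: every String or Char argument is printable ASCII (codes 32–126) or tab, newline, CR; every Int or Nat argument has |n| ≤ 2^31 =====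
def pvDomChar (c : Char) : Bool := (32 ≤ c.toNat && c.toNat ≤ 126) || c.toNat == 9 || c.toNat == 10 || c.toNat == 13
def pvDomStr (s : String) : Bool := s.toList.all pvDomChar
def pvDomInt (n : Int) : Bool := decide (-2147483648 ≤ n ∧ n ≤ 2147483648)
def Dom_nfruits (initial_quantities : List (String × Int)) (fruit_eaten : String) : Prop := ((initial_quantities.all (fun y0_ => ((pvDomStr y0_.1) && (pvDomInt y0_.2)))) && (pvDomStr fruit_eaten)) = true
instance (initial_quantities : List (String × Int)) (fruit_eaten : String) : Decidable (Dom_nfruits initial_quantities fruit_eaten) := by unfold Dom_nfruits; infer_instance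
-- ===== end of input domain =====

-- B replaces A's O(n*k) per-character simulation over the dict by one counting pass and a
-- per-fruit closed form (faster, asymptotic). A mutates its dict argument in place; the
-- equivalence proved here is about the RETURN value only (B does not mutate).


-- ===== PORT A =====
-- The dict argument is marshalled with PySem.Dict.ofList; `fruit_eaten[current_fruit]` is
-- pyGetD with a dummy default (the index is always in range), `d[fruit] -= 1` is Dict.modify
-- (the key is always present), and the 1-char-string == string test compares the char lists.
def nfruits (initial_quantities : List (String × Int)) (fruit_eaten : String) : Int :=
  let cs := fruit_eaten.toList
  let n : Int := (cs.length : Int)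
  let d := (PySem.List.pyRange 0 n).foldl (fun d i =>
    d.keys.foldl (fun d fruit =>
      if [PySem.List.pyGetD cs i ' '] = fruit.toList then
        d.modify fruit 0 (· - 1)
      else if i ≠ n - 1 then
        d.modify fruit 0 (· + 1)
      else d) d) (PySem.Dict.ofList initial_quantities)
  d.keys.foldl (fun max_quantity fruit =>
    if d.getD fruit 0 > max_quantity then d.getD fruit 0 else max_quantity) 0

-- ===== PORT B =====
-- counts is keyed by the chars of fruit_eaten; `counts.get(fruit, 0)` on the str key fruit
-- matches exactly when fruit's char list is the singleton of such a char, and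
-- `fruit != last` (last = fruit_eaten[-1] if n else None) is the match on cs.getLast?.
def nfruits_alt (initial_quantities : List (String × Int)) (fruit_eaten : String) : Int :=
  let cs := fruit_eaten.toList
  let n : Int := (cs.length : Int)
  let counts := PySem.Dict.counter cs
  let last? := cs.getLast?
  (PySem.Dict.ofList initial_quantities).items.foldl (fun best p =>
    let c : Int := match p.1.toList with
      | [ch] => counts.getD ch 0
      | _ => 0
    let adj : Int := match last? with
      | none => 0
      | some lc => if p.1.toList ≠ [lc] then 1 else 0
    let fin := p.2 + n - 2 * c - adj
    if fin > best then fin else best) 0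

-- ===== PRECONDITION & SPEC =====
def Spec_nfruits (initial_quantities : List (String × Int)) (fruit_eaten : String) (out : Int) : Prop := out = nfruits_alt initial_quantities fruit_eaten
instance (initial_quantities : List (String × Int)) (fruit_eaten : String) (out : Int) : Decidable (Spec_nfruits initial_quantities fruit_eaten out) := by unfold Spec_nfruits; infer_instance

-- ===== CLAIM (what is proved, stated in full; the proofs are below) =====
def Claim_equal_nfruits : Prop := ∀ (initial_quantities : List (String × Int)) (fruit_eaten : String), Dom_nfruits initial_quantities fruit_eaten → Spec_nfruits initial_quantities fruit_eaten (nfruits initial_quantities fruit_eaten)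

-- ===== LEMMAS AND PROOFS =====

-- A's inner loop body and the per-(index, fruit) change it makes to one quantity.
def innerStep (cs : List Char) (n i : Int) (d : PySem.Dict String Int) (fruit : String) : PySem.Dict String Int :=
  if [PySem.List.pyGetD cs i ' '] = fruit.toList then
    d.modify fruit 0 (· - 1)
  else if i ≠ n - 1 then
    d.modify fruit 0 (· + 1)
  else d

def delta (cs : List Char) (n i : Int) (k : String) : Int :=
  if [PySem.List.pyGetD cs i ' '] = k.toList then -1 else if i ≠ n - 1 then 1 else 0

lemma innerStep_keys (cs : List Char) (n i : Int) (d : PySem.Dict String Int) (fruit : String)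
    (h : fruit ∈ d.keys) : (innerStep cs n i d fruit).keys = d.keys := by
  have hc : d.contains fruit = true := (PySem.Dict.contains_iff_mem_keys d fruit).mpr h
  unfold innerStep
  split_ifs <;>
    simp [PySem.Dict.keys_modify, PySem.Dict.keys_insert_of_contains _ _ hc]

lemma inner_fold_keys (cs : List Char) (n i : Int) (l : List String) (d : PySem.Dict String Int)
    (h : ∀ f ∈ l, f ∈ d.keys) : (l.foldl (innerStep cs n i) d).keys = d.keys := by
  induction l generalizing d with
  | nil => rfl
  | cons f t ih =>
    have hk : (innerStep cs n i d f).keys = d.keys :=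
      innerStep_keys cs n i d f (h f (by simp))
    simp only [List.foldl_cons]
    rw [ih _ (fun g hg => hk ▸ h g (by simp [hg])), hk]

lemma inner_fold_getD (cs : List Char) (n i : Int) (l : List String) (hnd : l.Nodup)
    (d : PySem.Dict String Int) (k : String) :
    (l.foldl (innerStep cs n i) d).getD k 0
      = if k ∈ l then d.getD k 0 + delta cs n i k else d.getD k 0 := by
  induction l generalizing d with
  | nil => simp
  | cons f t ih =>
    obtain ⟨hf, hndt⟩ := List.nodup_cons.mp hnd
    simp only [List.foldl_cons]
    rw [ih hndt]
    by_cases hk : k = f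
    · subst hk
      have hkt : k ∉ t := hf
      simp only [hkt, List.mem_cons, true_or]
      unfold innerStep delta
      split_ifs with h1 h2 <;>
        simp [PySem.Dict.getD_modify_self] <;> omega
    · have hstep : (innerStep cs n i d f).getD k 0 = d.getD k 0 := by
        unfold innerStep
        split_ifs <;> first
          | rfl
          | exact PySem.Dict.getD_modify_of_ne d 0 _ hk
      by_cases hkt : k ∈ t <;> simp [hstep, hkt, hk]

lemma outer_fold (cs : List Char) (n : Int) (I : List Int) (d : PySem.Dict String Int)
    (hnd : d.keys.Nodup) :
    (I.foldl (fun d i => d.keys.foldl (innerStep cs n i) d) d).keys = d.keys ∧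
    ∀ k, (I.foldl (fun d i => d.keys.foldl (innerStep cs n i) d) d).getD k 0
      = d.getD k 0 + (if k ∈ d.keys then (I.map (fun i => delta cs n i k)).sum else 0) := by
  induction I generalizing d with
  | nil => simp
  | cons i t ih =>
    have hk1 : (d.keys.foldl (innerStep cs n i) d).keys = d.keys :=
      inner_fold_keys cs n i d.keys d (fun f hf => hf)
    obtain ⟨ihk, ihg⟩ := ih (d.keys.foldl (innerStep cs n i) d) (by rw [hk1]; exact hnd)
    refine ⟨by simpa [hk1] using ihk, fun k => ?_⟩
    simp only [List.foldl_cons]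
    rw [ihg k, hk1, inner_fold_getD cs n i d.keys hnd d k]
    by_cases hk : k ∈ d.keys
    · simp [hk]; ring
    · simp [hk]

lemma sum_pm (as : List Char) (kl : List Char) :
    ((as.map (fun ch => if [ch] = kl then (-1 : Int) else 1)).sum)
      = (as.length : Int) - 2 * (as.countP (fun ch => decide ([ch] = kl)) : Int) := by
  induction as with
  | nil => simp
  | cons a t ih =>
    simp only [List.map_cons, List.sum_cons, List.countP_cons, ih]
    by_cases h : [a] = kl
    · simp [h]; ring
    · simp [h]; ring

lemma sum_delta (cs : List Char) (k : String) :
    ((PySem.List.pyRange 0 (cs.length : Int)).map (fun i => delta cs (cs.length : Int) i k)).sum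
      = (cs.length : Int) - 2 * (cs.countP (fun ch => decide ([ch] = k.toList)) : Int)
        - (match cs.getLast? with
            | none => 0
            | some lc => if k.toList ≠ [lc] then (1 : Int) else 0) := by
  induction cs using List.reverseRecOn with
  | nil => simp [PySem.List.pyRange]
  | append_singleton as a _ =>
    have hm : (0 : Int) ≤ (as.length : Int) := by positivity
    have hlen : ((as ++ [a]).length : Int) = (as.length : Int) + 1 := by simp
    rw [hlen, PySem.List.pyRange_one_succ_right hm, List.map_append, List.sum_append]
    have hmid : ((PySem.List.pyRange 0 (as.length : Int)).map
        (fun i => delta (as ++ [a]) ((as.length : Int) + 1) i k)).sum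
        = ((as.map (fun ch => if [ch] = k.toList then (-1 : Int) else 1)).sum) := by
      have hcong : ∀ i ∈ PySem.List.pyRange 0 (as.length : Int),
          delta (as ++ [a]) ((as.length : Int) + 1) i k
            = (fun ch => if [ch] = k.toList then (-1 : Int) else 1) (PySem.List.pyGetD as i ' ') := by
        intro i hi
        obtain ⟨h0, h1⟩ := PySem.List.mem_pyRange_one.mp hi
        have hget : PySem.List.pyGetD (as ++ [a]) i ' ' = PySem.List.pyGetD as i ' ' := by
          rw [PySem.List.pyGetD_eq_getElem _ _ (by omega) (by simpa using by omega),
              PySem.List.pyGetD_eq_getElem _ _ (by omega) (by omega)]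
          exact List.getElem_append_left (by omega)
        have hne : i ≠ (as.length : Int) + 1 - 1 := by omega
        simp [delta, hget, show ¬ i = (as.length : Int) by omega]
      rw [List.map_congr_left hcong]
      have hids : List.map (fun j => PySem.List.pyGetD as j ' ') (PySem.List.pyRange 0 ((as.length : Int))) = as := by
        simpa [PySem.List.len] using PySem.List.map_pyGetD_pyRange_zero as ' '
      conv_rhs => rw [← hids]
      rw [List.map_map]
      rfl
    have hlast : delta (as ++ [a]) ((as.length : Int) + 1) (as.length : Int) k
        = if [a] = k.toList then (-1 : Int) else 0 := by
      have hget : PySem.List.pyGetD (as ++ [a]) (as.length : Int) ' ' = a := by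
        rw [PySem.List.pyGetD_eq_getElem _ _ (by omega) (by simp)]
        simp
      simp [delta, hget]
    rw [hmid, sum_pm as k.toList]
    simp only [List.map_cons, List.map_nil, List.sum_cons, List.sum_nil, hlast,
      List.getLast?_concat, List.countP_append, List.countP_cons, List.countP_nil]
    by_cases h : [a] = k.toList
    · have hd : decide ([a] = k.toList) = true := by simpa using h
      have h' : ¬ (k.toList ≠ [a]) := by simp [h.symm]
      rw [if_pos h, if_neg h', hd]
      push_cast
      rw [if_pos (rfl : true = true)]
      ring
    · have hd : decide ([a] = k.toList) = false := decide_eq_false h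
      have h' : k.toList ≠ [a] := fun hh => h (Eq.symm hh)
      rw [if_neg h, if_pos h', hd]
      push_cast; ring

lemma count_eq_countP_single (cs : List Char) (c : Char) :
    (cs.count c : Int) = (cs.countP (fun ch => decide ([ch] = [c])) : Int) := by
  have : cs.count c = cs.countP (fun ch => decide ([ch] = [c])) := by
    unfold List.count
    apply List.countP_congr
    intro ch _
    constructor
    · intro hb; exact decide_eq_true (by simpa using of_decide_eq_true hb)
    · intro hb; exact decide_eq_true (by simpa using of_decide_eq_true hb)
  rw [this]

lemma countP_single_eq_zero (cs : List Char) (kl : List Char) (h : ∀ c : Char, kl ≠ [c]) :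
    cs.countP (fun ch => decide ([ch] = kl)) = 0 := by
  apply List.countP_eq_zero.mpr
  intro ch _
  exact fun hb => h ch (Eq.symm (of_decide_eq_true hb))

-- ===== VERDICT (by name: the statement is the Claim_ definition above) =====
theorem nfruits_spec : Claim_equal_nfruits := by
  intro qs s _
  unfold Spec_nfruits nfruits nfruits_alt
  set cs := s.toList with hcs
  set n : Int := (cs.length : Int) with hn
  set d0 := PySem.Dict.ofList qs with hd0
  have hnd : d0.keys.Nodup := PySem.Dict.nodup_keys_ofList qs
  obtain ⟨hkeys, hgetD⟩ := outer_fold cs n (PySem.List.pyRange 0 n) d0 hnd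
  -- rewrite B's items fold as a fold over the keys
  rw [PySem.Dict.items_eq_map_keys d0 hnd 0, List.foldl_map]
  -- identify A's loop body with innerStep
  show (((PySem.List.pyRange 0 n).foldl (fun d i => d.keys.foldl (innerStep cs n i) d) d0).keys.foldl
      (fun max_quantity fruit =>
        if ((PySem.List.pyRange 0 n).foldl (fun d i => d.keys.foldl (innerStep cs n i) d) d0).getD fruit 0 > max_quantity
        then ((PySem.List.pyRange 0 n).foldl (fun d i => d.keys.foldl (innerStep cs n i) d) d0).getD fruit 0
        else max_quantity) 0) = _
  rw [hkeys]
  apply PySem.List.foldl_congr_mem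
  intro acc k hk
  have hval : ((PySem.List.pyRange 0 n).foldl (fun d i => d.keys.foldl (innerStep cs n i) d) d0).getD k 0
      = d0.getD k 0 + n - 2 * (cs.countP (fun ch => decide ([ch] = k.toList)) : Int)
        - (match cs.getLast? with
            | none => 0
            | some lc => if k.toList ≠ [lc] then (1 : Int) else 0) := by
    rw [hgetD k, if_pos hk, hn, sum_delta cs k]
    ring
  have hcount : (match k.toList with
      | [ch] => (PySem.Dict.counter cs).getD ch 0
      | _ => (0 : Int))
      = (cs.countP (fun ch => decide ([ch] = k.toList)) : Int) := by
    match hkl : k.toList with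
    | [ch] =>
      show (PySem.Dict.counter cs).getD ch 0 = _
      rw [PySem.Dict.getD_counter]
      exact count_eq_countP_single cs ch
    | [] => show (0 : Int) = _; rw [countP_single_eq_zero cs [] (by simp)]; rfl
    | c1 :: c2 :: rest => show (0 : Int) = _; rw [countP_single_eq_zero cs _ (by simp)]; rfl
  simp only [hval, ← hcount]
  rfl
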